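-- pv_equiv track=rewrite | github.com/FriendGaru/AoC2020 | day20/20b.py | build_image_permutations
-- ===== SOURCE A (Python) =====
-- def build_image_permutations(image):
--     permutations = []
--     for i in range(2):
--         permutation_rows = [row for row in image]
--         for j in range(i):
--             temp_rows = []
--             for r in range(len(permutation_rows)):
--                 temp_rows.append("".join([row[r] for row in reversed(permutation_rows)]))
--             permutation_rows = temp_rows
--         permutations.append(tuple([row for row in permutation_rows]))
--         permutations.append(tuple(reversed([row for row in permutation_rows])))
--         permutations.append(tuple(["".join(reversed(row)) for row in permutation_rows]))
--         permutations.append(tuple(reversed(tuple(["".join(reversed(row)) for row in permutation_rows]))))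
--     return permutations
-- ===== SOURCE B (Python) =====
-- def build_image_permutations(image):
--     # Single left-to-right pass over the rows, maintaining accumulators for all
--     # eight symmetry variants at once (rows appended/prepended; column strings
--     # grown per row), instead of A's staged base-then-reflections construction.
--     h = len(image)
--     top, bot, topr, botr = [], [], [], []
--     cols = [""] * h       # ends as the transpose: cols[r] = image[0][r]..image[h-1][r]
--     colsp = [""] * h      # ends as the cw rotation: colsp[r] = image[h-1][r]..image[0][r]
--     for row in image:
--         rr = row[::-1]
--         top = top + [row]
--         bot = [row] + bot
--         topr = topr + [rr]
--         botr = [rr] + botr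
--         cols = [cols[r] + row[r] for r in range(h)]
--         colsp = [row[r] + colsp[r] for r in range(h)]
--     return [tuple(top), tuple(bot), tuple(topr), tuple(botr),
--             tuple(colsp), tuple(colsp[::-1]), tuple(cols), tuple(cols[::-1])]
-- ===== Notes on version B (the rewrite author's own statement) =====
-- stated objective: alternative
-- what changed: B makes a single left-to-right pass over the rows, maintaining eight accumulators at once (row lists grown by append/prepend and per-column strings grown char by char for the transpose and the cw rotation), instead of A's staged construction of a rotated base by column-joins followed by four reflections of each base.
import Mathlib
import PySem

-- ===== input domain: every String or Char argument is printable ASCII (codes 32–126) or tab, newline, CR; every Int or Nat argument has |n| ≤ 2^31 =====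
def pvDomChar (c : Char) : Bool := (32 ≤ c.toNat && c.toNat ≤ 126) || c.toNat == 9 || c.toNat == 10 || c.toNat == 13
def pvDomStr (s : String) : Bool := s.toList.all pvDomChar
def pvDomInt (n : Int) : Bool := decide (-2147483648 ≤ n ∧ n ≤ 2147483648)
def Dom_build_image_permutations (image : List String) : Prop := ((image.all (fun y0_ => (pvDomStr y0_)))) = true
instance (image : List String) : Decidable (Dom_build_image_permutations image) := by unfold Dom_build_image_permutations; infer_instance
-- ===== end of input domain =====

-- B replaces A's staged construction (rotated base via column-joins, then four reflections of each
-- base) by ONE pass over the rows that grows all eight variants in accumulators; objective: alternative.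

-- ===== PORT A =====
-- one rotation step: temp_rows[r] = "".join(row[r] for row in reversed(rows));
-- row[r] with r in range(len(rows)) is exact under Pre_ (pyGetD default unreachable there)
def pvRotA (rows : List String) : List String :=
  (PySem.List.pyRange 0 rows.length 1).map (fun r =>
    String.ofList (rows.reverse.map (fun row => PySem.List.pyGetD row.toList r ' ')))

def build_image_permutations (image : List String) : List (List String) :=
  (PySem.List.pyRange 0 2 1).foldl (fun permutations i =>
    let permutation_rows :=
      (PySem.List.pyRange 0 i 1).foldl (fun pr _ => pvRotA pr) (image.map (fun row => row))
    -- "".join(reversed(row)) is the reversal of the string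
    let flipped := permutation_rows.map (fun row => String.ofList row.toList.reverse)
    permutations ++
      [permutation_rows.map (fun row => row),
       (permutation_rows.map (fun row => row)).reverse,
       flipped,
       flipped.reverse]) []

-- ===== PORT B =====
-- rr = row[::-1] (string reversal)
def pvRevS (row : String) : String := String.ofList row.toList.reverse

-- loop body: column accumulators kept as List Char ("" grown char by char), joined at the end;
-- row[r] with r in range(h) is exact under Pre_ (pyGetD default unreachable there)
def pvStepB (h : Nat)
    (st : List String × List String × List String × List String × List (List Char) × List (List Char))
    (row : String) :
    List String × List String × List String × List String × List (List Char) × List (List Char) :=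
  match st with
  | (top, bot, topr, botr, cols, colsp) =>
    let rr := pvRevS row
    (top ++ [row], row :: bot, topr ++ [rr], rr :: botr,
     (List.range h).map (fun (r : Nat) => cols.getD r [] ++ [PySem.List.pyGetD row.toList (r : Int) ' ']),
     (List.range h).map (fun (r : Nat) => PySem.List.pyGetD row.toList (r : Int) ' ' :: colsp.getD r []))

def build_image_permutations_alt (image : List String) : List (List String) :=
  let h := image.length
  match image.foldl (pvStepB h) ([], [], [], [], List.replicate h [], List.replicate h []) with
  | (top, bot, topr, botr, cols, colsp) =>
    [top, bot, topr, botr,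
     colsp.map String.ofList, (colsp.map String.ofList).reverse,
     cols.map String.ofList, (cols.map String.ofList).reverse]

-- ===== PRECONDITION & SPEC =====
-- Pre_ excludes exactly the inputs where Python A raises IndexError: some row shorter than the
-- number of rows (row[r] for r in range(len(image)) goes out of range).
def Pre_build_image_permutations (image : List String) : Prop :=
  ∀ row ∈ image, image.length ≤ row.toList.length
instance (image : List String) : Decidable (Pre_build_image_permutations image) := by
  unfold Pre_build_image_permutations; infer_instance

def pvWitness_build_image_permutations : List String := ["ab", "cd"]

def Spec_build_image_permutations (image : List String) (out : List (List String)) : Prop := out = build_image_permutations_alt image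
instance (image : List String) (out : List (List String)) : Decidable (Spec_build_image_permutations image out) := by unfold Spec_build_image_permutations; infer_instance

-- ===== CLAIM (what is proved, stated in full; the proofs are below) =====
def Claim_equal_build_image_permutations : Prop := ∀ (image : List String), Dom_build_image_permutations image → Pre_build_image_permutations image → Spec_build_image_permutations image (build_image_permutations image)

-- ===== LEMMAS AND PROOFS =====

-- the column chars of image at column r, top to bottom
def pvColC (image : List String) (r : Nat) : List Char :=
  image.map (fun row => PySem.List.pyGetD row.toList (r : Int) ' ')

-- invariant of B's fold
theorem pvFoldB (h : Nat) (l : List String)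
    (top bot topr botr : List String) (c cp : Nat → List Char) :
    l.foldl (pvStepB h) (top, bot, topr, botr, (List.range h).map c, (List.range h).map cp) =
    (top ++ l, l.reverse ++ bot, topr ++ l.map pvRevS, (l.map pvRevS).reverse ++ botr,
     (List.range h).map (fun (r : Nat) => c r ++ pvColC l r),
     (List.range h).map (fun (r : Nat) => (pvColC l r).reverse ++ cp r)) := by
  induction l generalizing top bot topr botr c cp with
  | nil => simp [pvColC]
  | cons row l ih =>
    simp only [List.foldl_cons, pvStepB]
    have hc : (List.range h).map (fun (r : Nat) => (((List.range h).map c).getD r []) ++ [PySem.List.pyGetD row.toList (r : Int) ' ']) =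
        (List.range h).map (fun (r : Nat) => c r ++ [PySem.List.pyGetD row.toList (r : Int) ' ']) := by
      refine List.map_congr_left ?_
      intro r hr
      rw [List.getD_eq_getElem _ _ (by simpa using hr)]
      simp
    have hcp : (List.range h).map (fun (r : Nat) => PySem.List.pyGetD row.toList (r : Int) ' ' :: (((List.range h).map cp).getD r [])) =
        (List.range h).map (fun (r : Nat) => PySem.List.pyGetD row.toList (r : Int) ' ' :: cp r) := by
      refine List.map_congr_left ?_
      intro r hr
      rw [List.getD_eq_getElem _ _ (by simpa using hr)]
      simp
    rw [hc, hcp, ih]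
    simp [pvColC, List.append_assoc]

-- ===== VERDICT (by name: the statement is the Claim_ definition above) =====
theorem build_image_permutations_spec : Claim_equal_build_image_permutations := by
  intro image _ _
  show _ = _
  unfold build_image_permutations build_image_permutations_alt
  have h01 : PySem.List.pyRange 0 2 1 = [0, 1] := by decide
  have h0 : PySem.List.pyRange 0 (0:Int) 1 = [] := by decide
  have h1 : PySem.List.pyRange 0 (1:Int) 1 = [0] := by decide
  have hrep : ∀ h : Nat, List.replicate h ([] : List Char) = (List.range h).map (fun _ => []) := by
    intro h; simp [List.map_const']
  simp only [h01, h0, h1, List.foldl, List.map_id', List.nil_append, hrep]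
  rw [pvFoldB]
  -- characterise A's rotated base via column chars
  have hrot : pvRotA image = (List.range image.length).map
      (fun r => String.ofList ((pvColC image r).reverse)) := by
    unfold pvRotA
    rw [PySem.List.pyRange_zero_natCast, List.map_map]
    refine List.map_congr_left ?_
    intro r _
    simp [pvColC, Function.comp, List.map_reverse]
  simp only [hrot, List.map_map, List.append_nil, List.nil_append]
  simp [Function.comp, pvRevS]
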